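-- pv_equiv track=rewrite | github.com/Pi3dra/OptiGraphes | chainMoney.py | generate_chains
-- ===== SOURCE A (Python) =====
-- ALPHABET = ("0", "1", "2", "3")
--
-- def generate_chains(p):
--     """
--     Génère toutes les chaînes de longueur p:
--       - commencent par 'E' et finissent par 'E'
--       - sans deux caractères identiques consécutifs
--     Retourne un générateur (itérer pour parcourir sans tout stocker).
--     """
--     if p < 2:
--         return
--
--     p += 1 # correction p est le nombre de transaction et non pas le nombre de noeuds
--
--     # Positions 2..p-1 (p-2 positions internes)
--     # On impose les contraintes localement pour éviter l'explosion combinatoire.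
--     def backtrack(prefix):
--         i = len(prefix) # index 0..(p-1)
--         if i == p:
--             yield "".join(prefix)
--             return
--
--         if i == 0:
--             choices = ("0",)
--         elif i == p-1:
--             choices = ("0",)
--         else:
--             prev = prefix[-1]
--             choices = (c for c in ALPHABET if c != prev)
--
--         for c in choices:
--             if i > 0 and c == prefix[-1]:
--                 continue
--             prefix.append(c)
--             yield from backtrack(prefix)
--             prefix.pop()
--
--     yield from backtrack(prefix=[])
-- ===== SOURCE B (Python) =====
-- ALPHABET = ("0", "1", "2", "3")
--
-- def generate_chains(p):
--     # Iterative breadth-first construction: grow the whole set of valid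
--     # prefixes one position at a time, then close every chain with the
--     # final '0' (kept only when the last internal character is not '0').
--     if p < 2:
--         return
--     k = (p + 1) - 2  # number of internal positions after the leading '0'
--     chains = ["0"]
--     for _ in range(k):
--         chains = [s + c for s in chains for c in ALPHABET if c != s[-1]]
--     for s in chains:
--         if s[-1] != "0":
--             yield s + "0"
-- ===== Notes on version B (the rewrite author's own statement) =====
-- stated objective: simpler
-- what changed: Replaced the recursive depth-first backtracking generator with an iterative breadth-first construction: the whole list of valid prefixes is grown one position at a time by a list comprehension, then each chain is closed with the final '0'.
import Mathlib
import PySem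

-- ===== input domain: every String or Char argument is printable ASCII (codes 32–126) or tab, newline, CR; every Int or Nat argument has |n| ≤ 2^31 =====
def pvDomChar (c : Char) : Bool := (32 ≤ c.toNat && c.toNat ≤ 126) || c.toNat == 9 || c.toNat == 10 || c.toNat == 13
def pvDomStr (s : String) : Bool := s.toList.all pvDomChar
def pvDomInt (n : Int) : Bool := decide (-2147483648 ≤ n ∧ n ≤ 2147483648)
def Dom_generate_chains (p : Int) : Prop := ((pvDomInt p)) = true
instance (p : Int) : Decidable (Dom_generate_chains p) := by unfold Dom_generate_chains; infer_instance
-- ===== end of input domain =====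

-- B replaces A's recursive depth-first backtracking generator by an iterative
-- breadth-first construction: grow the whole list of valid prefixes one position
-- at a time, then close each chain with the final '0'; objective: simpler.

-- ===== PORT A =====
def pyAlphabet : List Char := ['0', '1', '2', '3']

-- backtrack(prefix); the fuel argument is only a totality guard, always sufficient at the call site
def gcA_back : Nat → Nat → List Char → List String
  | 0, _, _ => []
  | fuel + 1, n, pre =>
    if pre.length = n then [String.ofList pre]
    else
      let choices : List Char :=
        if pre.length = 0 then ['0']
        else if pre.length = n - 1 then ['0']
        else pyAlphabet.filter (fun c => c != pre.getLastD ' ')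
      (choices.filter (fun c => !(decide (0 < pre.length) && (c == pre.getLastD ' ')))).flatMap
        (fun c => gcA_back fuel n (pre ++ [c]))

def generate_chains (p : Int) : List String :=
  if p < 2 then []
  else gcA_back ((p + 1).toNat + 1) (p + 1).toNat []

-- ===== PORT B =====
-- chains = [s + c for s in chains for c in ALPHABET if c != s[-1]]
def gcB_step (chains : List (List Char)) : List (List Char) :=
  chains.flatMap (fun s =>
    (pyAlphabet.filter (fun c => c != s.getLastD ' ')).map (fun c => s ++ [c]))

def gcB_levels : Nat → List (List Char)
  | 0 => [['0']]
  | k + 1 => gcB_step (gcB_levels k)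

def generate_chains_alt (p : Int) : List String :=
  if p < 2 then []
  else
    (gcB_levels ((p + 1).toNat - 2)).filterMap (fun s =>
      if s.getLastD ' ' != '0' then some (String.ofList (s ++ ['0'])) else none)

-- ===== PRECONDITION & SPEC =====
-- Pre_ excludes only large p, where A's recursion depth (one frame per chain
-- position) exceeds Python's default recursion limit so A raises RecursionError;
-- the bound is a safe closed-form margin below that limit.
def Pre_generate_chains (p : Int) : Prop := p < 900
instance (p : Int) : Decidable (Pre_generate_chains p) := by unfold Pre_generate_chains; infer_instance
def pvWitness_generate_chains : Int := (3)

def Spec_generate_chains (p : Int) (out : List String) : Prop := out = generate_chains_alt p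
instance (p : Int) (out : List String) : Decidable (Spec_generate_chains p out) := by unfold Spec_generate_chains; infer_instance

-- ===== CLAIM (what is proved, stated in full; the proofs are below) =====
def Claim_equal_generate_chains : Prop := ∀ (p : Int), Dom_generate_chains p → Pre_generate_chains p → Spec_generate_chains p (generate_chains p)

-- ===== LEMMAS AND PROOFS =====

-- depth-first expansion of one prefix through r more internal positions
def gcExt : Nat → List Char → List (List Char)
  | 0, pre => [pre]
  | r + 1, pre =>
    (pyAlphabet.filter (fun c => c != pre.getLastD ' ')).flatMap
      (fun c => gcExt r (pre ++ [c]))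

-- closing step shared by both sides
def gcClose (s : List Char) : Option String :=
  if s.getLastD ' ' != '0' then some (String.ofList (s ++ ['0'])) else none

lemma flatMap_singleton_map {α β : Type} (l : List α) (f : α → β) :
    l.flatMap (fun c => [f c]) = l.map f := by
  induction l with
  | nil => rfl
  | cons a l ih => simp [List.flatMap_cons, ih]

lemma gcExt_step (r : Nat) : ∀ pre : List Char, gcExt (r + 1) pre = gcB_step (gcExt r pre) := by
  induction r with
  | zero =>
    intro pre
    show (pyAlphabet.filter _).flatMap (fun c => [pre ++ [c]]) = _
    rw [flatMap_singleton_map]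
    simp [gcB_step, gcExt]
  | succ r ih =>
    intro pre
    calc gcExt (r + 1 + 1) pre
        = (pyAlphabet.filter (fun c => c != pre.getLastD ' ')).flatMap
            (fun c => gcExt (r + 1) (pre ++ [c])) := rfl
      _ = (pyAlphabet.filter (fun c => c != pre.getLastD ' ')).flatMap
            (fun c => gcB_step (gcExt r (pre ++ [c]))) := by simp only [ih]
      _ = gcB_step ((pyAlphabet.filter (fun c => c != pre.getLastD ' ')).flatMap
            (fun c => gcExt r (pre ++ [c]))) := by
          simp only [gcB_step, List.flatMap_assoc]
      _ = gcB_step (gcExt (r + 1) pre) := rfl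

lemma gcB_levels_eq (k : Nat) : gcB_levels k = gcExt k ['0'] := by
  induction k with
  | zero => rfl
  | succ k ih => rw [gcB_levels, ih, ← gcExt_step]

-- main invariant: from a nonempty prefix with r internal positions left, A's
-- backtracking produces exactly the closed depth-first expansion of that prefix
lemma gcA_of_pre (r : Nat) : ∀ (n : Nat) (pre : List Char), pre ≠ [] → pre.length + (r + 1) = n →
    gcA_back (r + 2) n pre = (gcExt r pre).filterMap gcClose := by
  induction r with
  | zero =>
    intro n pre hne hlen
    have h0 : pre.length ≠ 0 := by simpa using hne
    have h1 : ¬ pre.length = n := by omega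
    have h2 : pre.length = n - 1 := by omega
    have hd : decide (0 < pre.length) = true := decide_eq_true (Nat.pos_of_ne_zero h0)
    have hn2 : (pre ++ ['0']).length = n := by simp; omega
    simp only [gcA_back, if_neg h1, if_neg h0, if_pos h2, hd, Bool.true_and,
      List.filter_cons, List.filter_nil, gcExt, gcClose,
      List.filterMap_cons, List.filterMap_nil]
    by_cases hc : ('0' == pre.getLastD ' ') = true
    · have hg : pre.getLast?.getD ' ' = '0' := by
        rw [← List.getLastD_eq_getLast?]; exact (beq_iff_eq.mp hc).symm
      simp [hg]
    · have hb : (pre.getLastD ' ' != '0') = true := by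
        simp only [bne, Bool.not_eq_true'] at *
        simpa [BEq.comm] using hc
      simp only [Bool.not_eq_true] at hc
      simp only [hc, Bool.not_false, if_true, List.flatMap_cons, List.flatMap_nil,
        if_pos hn2, hb, List.append_nil]
  | succ r ih =>
    intro n pre hne hlen
    have h0 : pre.length ≠ 0 := by simpa using hne
    have h1 : ¬ pre.length = n := by omega
    have h2 : ¬ pre.length = n - 1 := by omega
    have hd : decide (0 < pre.length) = true := decide_eq_true (Nat.pos_of_ne_zero h0)
    have hfun : (fun c => gcA_back (r + 2) n (pre ++ [c])) =
        (fun c => (gcExt r (pre ++ [c])).filterMap gcClose) := by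
      funext c
      rw [ih n (pre ++ [c]) (by simp) (by simp; omega)]
    rw [show r + 1 + 2 = (r + 2) + 1 by omega]
    rw [gcA_back]
    simp only [if_neg h1, if_neg h0, if_neg h2, hd, Bool.true_and, hfun]
    rw [List.filter_filter]
    have hpred : (fun c => !(c == pre.getLastD ' ') && (c != pre.getLastD ' ')) =
        (fun c => c != pre.getLastD ' ') := by
      funext c
      by_cases h : (c == pre.getLastD ' ') = true <;> simp [bne, h]
    rw [hpred]
    rw [show gcExt (r + 1) pre =
      (pyAlphabet.filter (fun c => c != pre.getLastD ' ')).flatMap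
        (fun c => gcExt r (pre ++ [c])) from rfl]
    rw [List.filterMap_flatMap]

-- ===== VERDICT (by name: the statement is the Claim_ definition above) =====
theorem generate_chains_spec : Claim_equal_generate_chains := by
  intro p _ _
  unfold Spec_generate_chains generate_chains generate_chains_alt
  by_cases hp : p < 2
  · simp [hp]
  · rw [if_neg hp, if_neg hp]
    obtain ⟨k, hk⟩ : ∃ k, (p + 1).toNat = k + 3 := ⟨(p + 1).toNat - 3, by omega⟩
    rw [hk]
    rw [show k + 3 + 1 = (k + 3) + 1 from rfl, gcA_back]
    simp only [List.length_nil, Nat.lt_irrefl, decide_false,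
      Bool.false_and, Bool.not_false, List.filter_cons, if_true, List.filter_nil,
      List.flatMap_cons, List.flatMap_nil, List.append_nil, List.nil_append]
    rw [show k + 3 = (k + 1) + 2 by omega,
        gcA_of_pre (k + 1) ((k + 1) + 2) ['0'] (by simp) (by simp; omega)]
    rw [show k + 1 + 2 - 2 = k + 1 by omega, gcB_levels_eq]
    rfl
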